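-- pv_equiv track=rewrite | github.com/linzixuan45/Traditional-Chinese-Vertical-Recognition | utils.py | get_poem
-- ===== SOURCE A (Python) =====
-- def get_poem(poem_sort, loc_combine):
--     """
--     按照给定的位置合并信息合并
--     :param poem_sort:
--     :param loc_combine:
--     :return:
--     """
--     result_poem = []
--     jump_flag = False
--     for i in range(len(poem_sort)):
--         if jump_flag:
--             jump_flag = False
--             continue
--         elif i in loc_combine:
--             result_poem.append(poem_sort[i] + " " + poem_sort[i + 1])
--             jump_flag = True
--         else:
--             result_poem.append(poem_sort[i])
--
--     return result_poem
-- ===== SOURCE B (Python) =====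
-- def get_poem(poem_sort, loc_combine):
--     n = len(poem_sort)
--     # Stage 1: greedy over sorted unique in-range indices -> effective merge starts.
--     starts = set()
--     for j in sorted({j for j in loc_combine if 0 <= j < n}):
--         if j - 1 not in starts:
--             starts.add(j)
--     # Stage 2: stateless comprehension; indices right after a merge start are dropped.
--     return [poem_sort[i] + " " + poem_sort[i + 1] if i in starts else poem_sort[i]
--             for i in range(n) if i - 1 not in starts]
-- ===== Notes on version B (the rewrite author's own statement) =====
-- stated objective: faster
-- what changed: Replaces A's single stateful pass (jump_flag state machine with an 'i in loc_combine' list scan per index) by two stages: a greedy pass over the sorted unique in-range indices of loc_combine computes the set of effective merge starts, then a stateless comprehension with O(1) set lookups builds the output.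
-- outside the precondition, e.g. on get_poem(['a', 'b'], [0, 1]): A returns ['a b'], B returns ['a b']
import Mathlib
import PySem

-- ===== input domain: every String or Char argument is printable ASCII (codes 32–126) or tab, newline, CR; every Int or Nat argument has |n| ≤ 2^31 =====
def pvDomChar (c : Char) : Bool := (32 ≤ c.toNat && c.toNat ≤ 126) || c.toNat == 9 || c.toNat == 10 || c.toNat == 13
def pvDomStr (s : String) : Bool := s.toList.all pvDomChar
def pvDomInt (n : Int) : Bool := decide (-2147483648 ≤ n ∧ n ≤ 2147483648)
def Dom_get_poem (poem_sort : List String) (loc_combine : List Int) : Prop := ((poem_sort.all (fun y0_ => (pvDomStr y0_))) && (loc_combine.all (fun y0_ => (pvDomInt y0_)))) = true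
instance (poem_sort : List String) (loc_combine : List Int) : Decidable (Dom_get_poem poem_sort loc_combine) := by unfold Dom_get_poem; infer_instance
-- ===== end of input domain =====

-- B replaces A's single stateful flag pass by two stages: a greedy over the sorted unique
-- in-range indices computes the set of effective merge starts, then a stateless comprehension
-- builds the result (alternative decomposition; return value only).


-- ===== PORT A =====
-- A's for loop over range(len(poem_sort)) with the jump_flag skip state; poem_sort[i]
-- is PySem.List.pyGetD with default "" — inside Pre_ every access is in range.
def getPoemLoopA (ps : List String) (L : List Int) (i : Nat) (jump_flag : Bool)
    (result_poem : List String) : List String :=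
  if i < ps.length then
    if jump_flag then
      getPoemLoopA ps L (i + 1) false result_poem
    else if (i : Int) ∈ L then
      getPoemLoopA ps L (i + 1) true
        (result_poem ++ [PySem.List.pyGetD ps (i : Int) "" ++ " " ++ PySem.List.pyGetD ps ((i : Int) + 1) ""])
    else
      getPoemLoopA ps L (i + 1) false (result_poem ++ [PySem.List.pyGetD ps (i : Int) ""])
  else result_poem
termination_by ps.length - i

def get_poem (poem_sort : List String) (loc_combine : List Int) : List String :=
  getPoemLoopA poem_sort loc_combine 0 false []

-- ===== PORT B =====
-- Stage 1: greedy over sorted({j for j in loc_combine if 0 <= j < n}) — j becomes an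
-- effective merge start iff j-1 is not one already.
def pvStartsStep (S : PySem.Set Int) (j : Int) : PySem.Set Int :=
  if (j - 1) ∈ S then S else PySem.Set.add S j

def pvStarts (n : Nat) (L : List Int) : PySem.Set Int :=
  (PySem.List.sorted
      (PySem.Set.ofList (L.filter (fun j => decide (0 ≤ j) && decide (j < (n : Int)))))
      (fun x => x) false).foldl pvStartsStep []

-- Stage 2: the stateless comprehension over range(n).
def get_poem_alt (poem_sort : List String) (loc_combine : List Int) : List String :=
  let S := pvStarts poem_sort.length loc_combine
  (List.range poem_sort.length).filterMap (fun (i : Nat) =>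
    if ((i : Int) - 1) ∈ S then none
    else some (if (i : Int) ∈ S then
        PySem.List.pyGetD poem_sort (i : Int) "" ++ " " ++ PySem.List.pyGetD poem_sort ((i : Int) + 1) ""
      else
        PySem.List.pyGetD poem_sort (i : Int) ""))

-- ===== PRECONDITION & SPEC =====
-- Pre_ excludes inputs whose LAST index occurs in loc_combine: on most of those both
-- programs raise IndexError (poem_sort[i + 1] past the end); on the few where that last
-- index is ineffective because of an earlier merge (e.g. (['a','b'], [0, 1])) A returns
-- normally and B returns the same value, but the closed-form condition cannot separate them.
def Pre_get_poem (poem_sort : List String) (loc_combine : List Int) : Prop :=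
  poem_sort = [] ∨ ((poem_sort.length : Int) - 1) ∉ loc_combine
instance (poem_sort : List String) (loc_combine : List Int) : Decidable (Pre_get_poem poem_sort loc_combine) := by unfold Pre_get_poem; infer_instance

def pvWitness_get_poem : List String × List Int := (["ab", "cd", "ef"], [0])

def Spec_get_poem (poem_sort : List String) (loc_combine : List Int) (out : List String) : Prop := out = get_poem_alt poem_sort loc_combine
instance (poem_sort : List String) (loc_combine : List Int) (out : List String) : Decidable (Spec_get_poem poem_sort loc_combine out) := by unfold Spec_get_poem; infer_instance

-- ===== CLAIM (what is proved, stated in full; the proofs are below) =====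
def Claim_equal_get_poem : Prop := ∀ (poem_sort : List String) (loc_combine : List Int), Dom_get_poem poem_sort loc_combine → Pre_get_poem poem_sort loc_combine → Spec_get_poem poem_sort loc_combine (get_poem poem_sort loc_combine)

-- ===== LEMMAS AND PROOFS =====

-- The accumulator survives the fold.
theorem acc_subset_foldl_step (l : List Int) : ∀ (acc : List Int) (x : Int),
    x ∈ acc → x ∈ l.foldl pvStartsStep acc := by
  induction l with
  | nil => intro acc x h; exact h
  | cons a t ih =>
    intro acc x h
    apply ih
    unfold pvStartsStep
    split
    · exact h
    · exact (PySem.Set.mem_add _ _ _).2 (Or.inl h)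

-- Characterization of the greedy fold on a strictly increasing list.
theorem mem_foldl_step_iff (l : List Int) : ∀ (acc : List Int),
    (∀ a ∈ acc, ∀ r ∈ l, a < r) → l.Pairwise (· < ·) →
    (∀ j ∈ acc, j - 1 ∉ acc) →
    ∀ j, j ∈ l.foldl pvStartsStep acc ↔
      ((j ∈ acc ∨ j ∈ l) ∧ (j - 1) ∉ l.foldl pvStartsStep acc) := by
  induction l with
  | nil =>
    intro acc _ _ h3 j
    simp only [List.foldl_nil, List.not_mem_nil, or_false]
    constructor
    · intro h; exact ⟨h, h3 j h⟩
    · exact fun h => h.1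
  | cons r t ih =>
    intro acc h1 h2 h3 j
    have hrt : ∀ x ∈ t, r < x := by
      intro x hx; exact (List.pairwise_cons.1 h2).1 x hx
    have hacc_r : ∀ a ∈ acc, a < r := fun a ha => h1 a ha r (List.mem_cons_self)
    simp only [List.foldl_cons]
    by_cases hg : (r - 1) ∈ acc
    · -- guard true: acc unchanged, r is NOT added (r-1 already a start)
      have hstep : pvStartsStep acc r = acc := by unfold pvStartsStep; simp [hg]
      rw [hstep]
      have hih := ih acc (fun a ha x hx => lt_trans (hacc_r a ha) (hrt x hx))
        (List.pairwise_cons.1 h2).2 h3 j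
      rw [hih]
      constructor
      · intro ⟨hm, hnm⟩; exact ⟨Or.imp_right (List.mem_cons_of_mem r) hm, hnm⟩
      · rintro ⟨hm, hnm⟩
        rcases hm with hm | hm
        · exact ⟨Or.inl hm, hnm⟩
        · rcases List.mem_cons.1 hm with rfl | hm'
          · -- j = r: but r-1 ∈ acc ⊆ result, contradicting hnm
            exact absurd (acc_subset_foldl_step t acc _ hg) hnm
          · exact ⟨Or.inr hm', hnm⟩
    · -- guard false: r is added
      have hr : r ∉ acc := fun hmem => absurd (hacc_r r hmem) (lt_irrefl r)
      have hstep : pvStartsStep acc r = acc ++ [r] := by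
        unfold pvStartsStep PySem.Set.add PySem.Set.contains
        simp [hg, List.contains_eq_mem, hr]
      rw [hstep]
      have h1' : ∀ a ∈ acc ++ [r], ∀ x ∈ t, a < x := by
        intro a ha x hx
        rcases List.mem_append.1 ha with ha | ha
        · exact lt_trans (hacc_r a ha) (hrt x hx)
        · simp at ha; subst ha; exact hrt x hx
      have h3' : ∀ a ∈ acc ++ [r], a - 1 ∉ acc ++ [r] := by
        intro a ha hcontr
        rcases List.mem_append.1 ha with ha | ha
        · rcases List.mem_append.1 hcontr with hc | hc
          · exact absurd hc (h3 a ha)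
          · simp at hc
            have := hacc_r a ha; omega
        · simp at ha; subst ha
          rcases List.mem_append.1 hcontr with hc | hc
          · exact hg hc
          · simp at hc
      have hih := ih (acc ++ [r]) h1' (List.pairwise_cons.1 h2).2 h3' j
      rw [hih]
      constructor
      · intro ⟨hm, hnm⟩
        refine ⟨?_, hnm⟩
        rcases hm with hm | hm
        · rcases List.mem_append.1 hm with hm' | hm'
          · exact Or.inl hm'
          · simp at hm'; exact Or.inr (by simp [hm'])
        · exact Or.inr (List.mem_cons_of_mem r hm)
      · rintro ⟨hm, hnm⟩
        refine ⟨?_, hnm⟩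
        rcases hm with hm | hm
        · exact Or.inl (List.mem_append.2 (Or.inl hm))
        · rcases List.mem_cons.1 hm with rfl | hm'
          · exact Or.inl (List.mem_append.2 (Or.inr (by simp)))
          · exact Or.inr hm'

-- pvStarts characterization: j is an effective merge start iff j ∈ loc_combine,
-- 0 ≤ j < n, and j-1 is not an effective merge start.
theorem mem_pvStarts_iff (n : Nat) (L : List Int) (j : Int) :
    j ∈ pvStarts n L ↔ (j ∈ L ∧ 0 ≤ j ∧ j < (n : Int) ∧ (j - 1) ∉ pvStarts n L) := by
  unfold pvStarts
  rw [mem_foldl_step_iff _ [] (by simp) (PySem.List.sorted_ofList_pairwise_lt _) (by simp) j]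
  simp only [List.not_mem_nil, false_or]
  rw [PySem.List.mem_sorted, PySem.Set.mem_ofList, List.mem_filter]
  constructor
  · intro ⟨⟨h1, h2⟩, h3⟩
    simp only [Bool.and_eq_true, decide_eq_true_eq] at h2
    exact ⟨h1, h2.1, h2.2, h3⟩
  · intro ⟨h1, h2, h3, h4⟩
    exact ⟨⟨h1, by simp [h2, h3]⟩, h4⟩

-- Proof-side recursive view of B's comprehension, indexed from i.
def compFrom (ps : List String) (S : List Int) (i : Nat) : List String :=
  if i < ps.length then
    if ((i : Int) - 1) ∈ S then compFrom ps S (i + 1)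
    else (if (i : Int) ∈ S then
        PySem.List.pyGetD ps (i : Int) "" ++ " " ++ PySem.List.pyGetD ps ((i : Int) + 1) ""
      else PySem.List.pyGetD ps (i : Int) "") :: compFrom ps S (i + 1)
  else []
termination_by ps.length - i

-- B's filterMap over range' i m equals compFrom i.
theorem filterMap_eq_compFrom (ps : List String) (S : List Int) :
    ∀ (m i : Nat), i + m = ps.length →
      (List.range' i m).filterMap (fun (k : Nat) =>
        if ((k : Int) - 1) ∈ S then none
        else some (if (k : Int) ∈ S then
            PySem.List.pyGetD ps (k : Int) "" ++ " " ++ PySem.List.pyGetD ps ((k : Int) + 1) ""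
          else PySem.List.pyGetD ps (k : Int) "")) = compFrom ps S i := by
  intro m
  induction m with
  | zero =>
    intro i h
    rw [compFrom]
    simp [show ¬ i < ps.length by omega]
  | succ m ih =>
    intro i h
    rw [List.range'_succ, List.filterMap_cons, compFrom]
    rw [if_pos (show i < ps.length by omega)]
    rw [ih (i + 1) (by omega)]
    by_cases hm : ((i : Int) - 1) ∈ S <;> simp [hm]

-- A's loop from index i, with the flag equal to "i-1 is an effective start",
-- produces the accumulator followed by compFrom i.
theorem loopA_eq_compFrom (ps : List String) (L : List Int) :
    ∀ (k i : Nat) (flag : Bool) (acc : List String),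
      ps.length - i ≤ k →
      (flag = true ↔ ((i : Int) - 1) ∈ pvStarts ps.length L) →
      getPoemLoopA ps L i flag acc = acc ++ compFrom ps (pvStarts ps.length L) i := by
  intro k
  induction k with
  | zero =>
    intro i flag acc h _
    rw [getPoemLoopA, compFrom]
    simp [show ¬ i < ps.length by omega]
  | succ k ih =>
    intro i flag acc h hflag
    rw [getPoemLoopA, compFrom]
    by_cases hi : i < ps.length
    · simp only [hi, if_true]
      have hcast : ((i + 1 : Nat) : Int) - 1 = (i : Int) := by push_cast; ring
      by_cases hprev : ((i : Int) - 1) ∈ pvStarts ps.length L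
      · -- previous index was a merge start: skip this one
        have hf : flag = true := hflag.2 hprev
        have hnotS : (i : Int) ∉ pvStarts ps.length L := by
          intro hS
          exact ((mem_pvStarts_iff _ _ _).1 hS).2.2.2 hprev
        rw [if_pos hf, if_pos hprev]
        exact ih (i + 1) false acc (by omega) (by simp [hnotS])
      · have hf : flag = false := by
          cases flag with
          | true => exact absurd (hflag.1 rfl) hprev
          | false => rfl
        rw [if_neg (by simp [hf]), if_neg hprev]
        by_cases hL : (i : Int) ∈ L
        · have hS : (i : Int) ∈ pvStarts ps.length L :=
            (mem_pvStarts_iff _ _ _).2 ⟨hL, by omega, by exact_mod_cast hi, hprev⟩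
          rw [if_pos hL, if_pos hS]
          rw [ih (i + 1) true (acc ++ [_]) (by omega) (by simp [hS])]
          simp
        · have hnotS : (i : Int) ∉ pvStarts ps.length L := by
            intro hS
            exact hL ((mem_pvStarts_iff _ _ _).1 hS).1
          rw [if_neg hL, if_neg hnotS]
          rw [ih (i + 1) false (acc ++ [_]) (by omega) (by simp [hnotS])]
          simp
    · simp [hi]

-- ===== VERDICT (by name: the statement is the Claim_ definition above) =====
theorem get_poem_spec : Claim_equal_get_poem := by
  intro ps L _ _
  unfold Spec_get_poem get_poem get_poem_alt
  have hneg : ((-1 : Int)) ∉ pvStarts ps.length L := by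
    intro h
    have := (mem_pvStarts_iff _ _ _).1 h
    omega
  rw [loopA_eq_compFrom ps L ps.length 0 false [] (by omega) (by simp [hneg])]
  rw [List.range_eq_range', filterMap_eq_compFrom ps _ ps.length 0 (by omega)]
  simp
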